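-- pv_equiv track=rewrite | github.com/timosarkar/FIDESlib-Metal | examples/resnet/weights/extract.py | altalena
-- ===== SOURCE A (Python) =====
-- def altalena(v):
--     new_v = []
--     for i in range(len(v)):
--         if i % 2 != 0:
--             new_v.append(0)
--         elif i % 64 >= 32 and i % 64 < 64:
--             new_v.append(0)
--         else:
--             new_v.append(v[i])
--     return new_v
-- ===== SOURCE B (Python) =====
-- def _interleave(head):
--     # head has only the to-keep positions pattern source: emit head[0], 0, head[2], 0, ...
--     out = []
--     while len(head) >= 2:
--         out += [head[0], 0]
--         head = head[2:]
--     return out + head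
--
-- def altalena(v):
--     out = []
--     for base in range(0, len(v), 64):
--         block = v[base:base + 64]
--         out += _interleave(block[:32])
--         out += [0] * max(len(block) - 32, 0)
--     return out
-- ===== Notes on version B (the rewrite author's own statement) =====
-- stated objective: alternative
-- what changed: B replaces A's per-index three-way branch with a block decomposition: it chunks v into 64-element blocks, builds each block's survivors by interleaving the first-32 prefix pairwise with zeros (consuming two elements at a time, no parity test), and pads the rest of the block with zeros.
import Mathlib
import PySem

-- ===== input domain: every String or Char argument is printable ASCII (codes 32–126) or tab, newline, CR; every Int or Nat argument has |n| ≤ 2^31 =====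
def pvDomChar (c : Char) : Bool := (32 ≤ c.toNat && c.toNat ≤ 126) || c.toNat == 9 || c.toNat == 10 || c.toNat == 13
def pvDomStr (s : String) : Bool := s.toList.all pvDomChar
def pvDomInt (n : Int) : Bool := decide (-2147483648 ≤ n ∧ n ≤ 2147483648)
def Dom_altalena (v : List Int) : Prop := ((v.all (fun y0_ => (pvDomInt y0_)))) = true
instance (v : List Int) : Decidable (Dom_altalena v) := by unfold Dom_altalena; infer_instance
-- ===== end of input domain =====

-- B re-derives the output block-wise: it chunks v into 64-element blocks and builds each
-- block as the first-32 prefix interleaved pairwise with zeros, padded with zeros —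
-- a different decomposition with the same O(n) cost.

-- ===== PORT A =====
-- v[i] is ported as pyGetD v i 0: i ranges over 0 .. len(v)-1, so the index is always in
-- range and the default is never used (exact).
def altalena (v : List Int) : List Int :=
  (PySem.List.pyRange 0 (v.length : Int) 1).foldl
    (fun new_v i =>
      if PySem.Int.mod i 2 ≠ 0 then new_v ++ [0]
      else if 32 ≤ PySem.Int.mod i 64 ∧ PySem.Int.mod i 64 < 64 then new_v ++ [0]
      else new_v ++ [PySem.List.pyGetD v i 0]) []

-- ===== PORT B =====
-- Source B's _interleave while-loop consumes two elements per step and returns the leftover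
-- (< 2 elements) appended; it is the structural two-at-a-time recursion below.
def pvInterleave : List Int → List Int
  | a :: _ :: t => a :: 0 :: pvInterleave t
  | h => h

-- max(len(block) - 32, 0) is computed on Int (Python ints) and converted for replicate.
def altalena_alt (v : List Int) : List Int :=
  (PySem.List.pyRange 0 (v.length : Int) 64).foldl
    (fun out base =>
      let block := PySem.List.slice v (some base) (some (base + 64))
      out ++ pvInterleave (PySem.List.slice block none (some 32))
          ++ List.replicate (((block.length : Int) - 32) ⊔ 0).toNat 0) []

-- ===== PRECONDITION & SPEC =====
def Spec_altalena (v : List Int) (out : List Int) : Prop := out = altalena_alt v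
instance (v : List Int) (out : List Int) : Decidable (Spec_altalena v out) := by unfold Spec_altalena; infer_instance

-- ===== CLAIM (what is proved, stated in full; the proofs are below) =====
def Claim_equal_altalena : Prop := ∀ (v : List Int), Dom_altalena v → Spec_altalena v (altalena v)

-- ===== LEMMAS AND PROOFS =====

-- the common pointwise description of the output
def pvTgt (v : List Int) (j : Nat) : Int :=
  if j % 2 = 0 ∧ j % 64 < 32 then v.getD j 0 else 0

theorem foldl_append_singleton (f : Nat → Int) :
    ∀ (l : List Nat) (acc : List Int),
      l.foldl (fun a k => a ++ [f k]) acc = acc ++ l.map f := by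
  intro l
  induction l with
  | nil => simp
  | cons k t ih => intro acc; simp [List.foldl_cons, ih]

theorem altalena_eq_map (v : List Int) :
    altalena v = (List.range v.length).map (pvTgt v) := by
  unfold altalena
  rw [PySem.List.pyRange_zero_nat, List.foldl_map]
  have hstep : ∀ (a : List Int) (k : Nat),
      (if PySem.Int.mod (k : Int) 2 ≠ 0 then a ++ [0]
       else if 32 ≤ PySem.Int.mod (k : Int) 64 ∧ PySem.Int.mod (k : Int) 64 < 64 then a ++ [0]
       else a ++ [PySem.List.pyGetD v (k : Int) 0]) = a ++ [pvTgt v k] := by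
    intro a k
    rw [PySem.Int.mod_eq_emod_of_pos (by norm_num : (0:Int) < 2),
        PySem.Int.mod_eq_emod_of_pos (by norm_num : (0:Int) < 64),
        PySem.List.pyGetD_natCast]
    unfold pvTgt
    by_cases hk2 : k % 2 = 0
    · rw [if_neg (show ¬((k : Int) % 2 ≠ 0) by omega)]
      by_cases hk64 : k % 64 < 32
      · rw [if_neg (show ¬(32 ≤ (k : Int) % 64 ∧ (k : Int) % 64 < 64) by omega),
            if_pos ⟨hk2, hk64⟩]
      · rw [if_pos (show 32 ≤ (k : Int) % 64 ∧ (k : Int) % 64 < 64 by constructor <;> omega),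
            if_neg (show ¬(k % 2 = 0 ∧ k % 64 < 32) from fun h => hk64 h.2)]
    · rw [if_pos (show (k : Int) % 2 ≠ 0 by omega),
          if_neg (show ¬(k % 2 = 0 ∧ k % 64 < 32) from fun h => hk2 h.1)]
  have hfun : (fun (a : List Int) (k : Nat) =>
      if PySem.Int.mod (k : Int) 2 ≠ 0 then a ++ [0]
      else if 32 ≤ PySem.Int.mod (k : Int) 64 ∧ PySem.Int.mod (k : Int) 64 < 64 then a ++ [0]
      else a ++ [PySem.List.pyGetD v (k : Int) 0]) = fun a k => a ++ [pvTgt v k] :=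
    funext fun a => funext fun k => hstep a k
  rw [hfun, foldl_append_singleton]
  simp

-- _interleave keeps even positions and zeroes odd positions of its argument
theorem pvInterleave_eq_map :
    ∀ (h : List Int),
      pvInterleave h = (List.range h.length).map
        (fun r => if r % 2 = 0 then h.getD r 0 else 0)
  | [] => by simp [pvInterleave]
  | [a] => by simp [pvInterleave, List.getD]
  | a :: b :: t => by
    have ih := pvInterleave_eq_map t
    show a :: 0 :: pvInterleave t = _
    rw [ih]
    have : t.length + 2 = (t.length + 1) + 1 := rfl
    simp only [List.length_cons, List.range_succ_eq_map, List.map_cons, List.map_map]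
    refine congrArg (a :: ·) (congrArg (0 :: ·) ?_)
    apply List.map_congr_left
    intro r _
    simp only [Function.comp]
    have h2 : (r + 1 + 1) % 2 = r % 2 := by omega
    rw [h2]
    by_cases hr : r % 2 = 0 <;> simp [hr, List.getD]

-- one block's contribution, for blocks of length ≤ 64
theorem block_contrib (block : List Int) (hlen : block.length ≤ 64) :
    pvInterleave (block.take 32) ++ List.replicate (((block.length : Int) - 32) ⊔ 0).toNat 0
      = (List.range block.length).map (pvTgt block) := by
  rw [pvInterleave_eq_map]
  have hmin : (block.take 32).length = min 32 block.length := by simp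
  by_cases hb : block.length ≤ 32
  · have h1 : (((block.length : Int) - 32) ⊔ 0).toNat = 0 := by omega
    rw [h1]
    simp only [List.replicate_zero, List.append_nil, hmin,
      Nat.min_eq_right hb]
    apply List.map_congr_left
    intro r hr
    rw [List.mem_range] at hr
    have hr32 : r < 32 := lt_of_lt_of_le hr hb
    have hr64 : r % 64 = r := Nat.mod_eq_of_lt (by omega)
    unfold pvTgt
    by_cases hp : r % 2 = 0
    · simp [hp, hr64, hr32, List.getD_eq_getElem?_getD, List.getElem?_take_of_lt hr32]
    · simp [hp]
  · have h32 : min 32 block.length = 32 := Nat.min_eq_left (by omega)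
    have hrep : (((block.length : Int) - 32) ⊔ 0).toNat = block.length - 32 := by omega
    have hsplit : block.length = 32 + (block.length - 32) := by omega
    rw [hmin, h32, hrep, hsplit, List.range_add, List.map_append]
    congr 1
    · apply List.map_congr_left
      intro r hr
      rw [List.mem_range] at hr
      have hr64 : r % 64 = r := Nat.mod_eq_of_lt (by omega)
      unfold pvTgt
      by_cases hp : r % 2 = 0
      · simp [hp, hr64, hr, List.getD_eq_getElem?_getD, List.getElem?_take_of_lt hr]
      · simp [hp]
    · rw [List.map_map]
      symm
      rw [List.eq_replicate_iff]
      refine ⟨by simp, ?_⟩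
      intro b hb'
      rw [List.mem_map] at hb'
      obtain ⟨r, hr, hrb⟩ := hb'
      rw [List.mem_range] at hr
      have : ¬(32 + r) % 64 < 32 := by
        have h64 : 32 + r < 64 := by omega
        have : (32 + r) % 64 = 32 + r := Nat.mod_eq_of_lt h64
        omega
      simp only [Function.comp, pvTgt] at hrb
      rw [if_neg (fun hh => this hh.2)] at hrb
      exact hrb.symm

-- shifting the target by one 64-block
theorem pvTgt_shift (v : List Int) (j : Nat) :
    pvTgt v (64 + j) = pvTgt (v.drop 64) j := by
  unfold pvTgt
  have h2 : (64 + j) % 2 = j % 2 := by omega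
  have h64 : (64 + j) % 64 = j % 64 := by omega
  rw [h2, h64]
  by_cases hp : j % 2 = 0 ∧ j % 64 < 32
  · rw [if_pos hp, if_pos hp]
    simp [List.getD_eq_getElem?_getD, List.getElem?_drop]
  · rw [if_neg hp, if_neg hp]

-- B's foldl body as a flatMap over block indices (after pyRange_of_pos + foldl_map)
def pvContrib (v : List Int) (base : Int) : List Int :=
  pvInterleave (PySem.List.slice (PySem.List.slice v (some base) (some (base + 64))) none (some 32))
    ++ List.replicate ((((PySem.List.slice v (some base) (some (base + 64))).length : Int) - 32) ⊔ 0).toNat 0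

theorem pvContrib_natCast (v : List Int) (b : Nat) :
    pvContrib v (b : Int) =
      pvInterleave (((v.drop b).take 64).take 32)
        ++ List.replicate (((((v.drop b).take 64).length : Int) - 32) ⊔ 0).toNat 0 := by
  unfold pvContrib
  rw [show ((b : Int) + 64) = ((b + 64 : Nat) : Int) by push_cast; ring,
      PySem.List.slice_natCast]
  have h : b + 64 - b = 64 := by omega
  rw [h, show (32:Int) = ((32:Nat):Int) by norm_num, PySem.List.slice_to_natCast]

theorem flatMap_contrib (m : Nat) :
    ∀ (v : List Int), v.length ≤ 64 * m →
      (List.range m).flatMap (fun k => pvContrib v ((64 * k : Nat) : Int))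
        = (List.range v.length).map (pvTgt v) := by
  induction m with
  | zero =>
    intro v hv
    have : v.length = 0 := by omega
    simp [this]
  | succ m ih =>
    intro v hv
    rw [List.range_succ_eq_map, List.flatMap_cons, List.flatMap_map]
    have hhead : pvContrib v ((64 * 0 : Nat) : Int)
        = (List.range (v.take 64).length).map (pvTgt (v.take 64)) := by
      rw [show (64 * 0 : Nat) = 0 from rfl, pvContrib_natCast]
      simp only [List.drop_zero]
      exact block_contrib (v.take 64) (by simp)
    have htail : ∀ k : Nat,
        pvContrib v ((64 * (k + 1) : Nat) : Int) = pvContrib (v.drop 64) ((64 * k : Nat) : Int) := by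
      intro k
      rw [pvContrib_natCast, pvContrib_natCast, List.drop_drop]
      have he : (64 : Nat) + 64 * k = 64 * (k + 1) := by ring
      rw [he]
    have hfun : (fun k => pvContrib v ((64 * (k + 1) : Nat) : Int))
        = fun k => pvContrib (v.drop 64) ((64 * k : Nat) : Int) := funext htail
    rw [hfun, ih (v.drop 64) (by simp; omega), hhead]
    by_cases hb : v.length ≤ 64
    · have hd : v.drop 64 = [] := List.drop_eq_nil_of_le hb
      have ht : v.take 64 = v := List.take_of_length_le hb
      simp [hd, ht]
    · have hlen : v.length = 64 + (v.length - 64) := by omega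
      have hlt : (v.take 64).length = 64 := by simp; omega
      have hld : (v.drop 64).length = v.length - 64 := by simp
      rw [hld, hlt]
      conv_rhs => rw [hlen]
      rw [List.range_add, List.map_append, List.map_map]
      congr 1
      · apply List.map_congr_left
        intro r hr
        rw [List.mem_range] at hr
        unfold pvTgt
        by_cases hp : r % 2 = 0 ∧ r % 64 < 32
        · rw [if_pos hp, if_pos hp]
          simp [List.getD_eq_getElem?_getD, List.getElem?_take_of_lt hr]
        · rw [if_neg hp, if_neg hp]
      · apply List.map_congr_left
        intro r _
        simp only [Function.comp]
        exact (pvTgt_shift v r).symm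

theorem altalena_alt_eq_map (v : List Int) :
    altalena_alt v = (List.range v.length).map (pvTgt v) := by
  unfold altalena_alt
  rw [PySem.List.pyRange_of_pos 0 (v.length : Int) (by norm_num : (0:Int) < 64), List.foldl_map]
  have hfun : (fun (out : List Int) (k : Nat) =>
      (fun out base =>
        let block := PySem.List.slice v (some base) (some (base + 64))
        out ++ pvInterleave (PySem.List.slice block none (some 32))
            ++ List.replicate (((block.length : Int) - 32) ⊔ 0).toNat 0) out (0 + 64 * (k : Int)))
      = fun out k => out ++ pvContrib v ((64 * k : Nat) : Int) := by
    funext out k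
    simp only [pvContrib, zero_add, List.append_assoc]
    norm_num
  rw [hfun, PySem.List.foldl_append_eq_flatMap]
  simp only [List.nil_append]
  have hM : (if (0:Int) < (v.length : Int) then
      (((v.length : Int) - 0 + 64 - 1) / 64).toNat else 0) = (v.length + 63) / 64 := by
    split_ifs with h <;> omega
  rw [hM]
  exact flatMap_contrib ((v.length + 63) / 64) v (by omega)

-- ===== VERDICT (by name: the statement is the Claim_ definition above) =====
theorem altalena_spec : Claim_equal_altalena := by
  intro v _
  unfold Spec_altalena
  rw [altalena_eq_map, altalena_alt_eq_map]
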